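-- pv_equiv track=rewrite | github.com/towd47/advent_of_code | 2024/24.py | getBxyz
-- ===== SOURCE A (Python) =====
-- def getBxyz(vals):
--     bs = []
--     for c in 'xyz':
--         vs = [v for v in vals if v.startswith(c)]
--         vs.sort()
--         vs.reverse()
--         bs.append(''.join([str(vals[v]) for v in vs]))
--     return bs
-- ===== SOURCE B (Python) =====
-- def getBxyz(vals):
--     bx, by_, bz = [], [], []
--     for v in vals:
--         c = v[:1]
--         if c == 'x':
--             bx.append(v)
--         elif c == 'y':
--             by_.append(v)
--         elif c == 'z':
--             bz.append(v)
--     return [''.join(str(vals[v]) for v in sorted(b, reverse=True))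
--             for b in (bx, by_, bz)]
-- ===== Notes on version B (the rewrite author's own statement) =====
-- stated objective: alternative
-- what changed: One grouping pass buckets the keys by first character into three lists, replacing three filtered scans of the dict, and each bucket is sorted descending directly (sorted(..., reverse=True)) instead of sort-then-reverse.
import Mathlib
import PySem

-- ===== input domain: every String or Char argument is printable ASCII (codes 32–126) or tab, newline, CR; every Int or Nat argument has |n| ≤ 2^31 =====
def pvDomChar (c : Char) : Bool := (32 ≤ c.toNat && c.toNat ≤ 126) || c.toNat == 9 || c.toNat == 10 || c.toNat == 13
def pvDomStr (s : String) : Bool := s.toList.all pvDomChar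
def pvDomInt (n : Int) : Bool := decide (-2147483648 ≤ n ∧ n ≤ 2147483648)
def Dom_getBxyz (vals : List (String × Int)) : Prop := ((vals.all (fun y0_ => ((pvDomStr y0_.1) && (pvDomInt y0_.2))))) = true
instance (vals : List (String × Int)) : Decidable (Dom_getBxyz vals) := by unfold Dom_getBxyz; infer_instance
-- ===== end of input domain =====

-- B replaces A's three filtered scans of the dict by one grouping pass into three
-- buckets and sorts each bucket descending directly; same cost, different shape.

-- ===== PORT A =====
def getBxyz (vals : List (String × Int)) : List String :=
  let d := PySem.Dict.ofList vals
  (['x', 'y', 'z'] : List Char).foldl (fun bs c =>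
    let vs := d.keys.filter (fun v => PySem.Str.startswith v (String.ofList [c]))
    let vs := PySem.List.sorted vs (fun x => x) false
    let vs := vs.reverse
    bs ++ [PySem.Str.join "" (vs.map (fun v => PySem.Int.toStr (d.getD v 0)))]) []

-- ===== PORT B =====
-- one grouping pass: bucket a key by its first character ('x'/'y'/'z', else skip)
def bucketStep (b : List String × List String × List String) (v : String) :
    List String × List String × List String :=
  let c := v.toList.take 1
  if c = ['x'] then (b.1 ++ [v], b.2.1, b.2.2)
  else if c = ['y'] then (b.1, b.2.1 ++ [v], b.2.2)
  else if c = ['z'] then (b.1, b.2.1, b.2.2 ++ [v])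
  else b

def bucketJoin (d : PySem.Dict String Int) (bucket : List String) : String :=
  PySem.Str.join "" ((PySem.List.sorted bucket (fun x => x) true).map
    (fun v => PySem.Int.toStr (d.getD v 0)))

def getBxyz_alt (vals : List (String × Int)) : List String :=
  let d := PySem.Dict.ofList vals
  let b := d.keys.foldl bucketStep ([], [], [])
  [bucketJoin d b.1, bucketJoin d b.2.1, bucketJoin d b.2.2]

-- ===== PRECONDITION & SPEC =====
def Spec_getBxyz (vals : List (String × Int)) (out : List String) : Prop := out = getBxyz_alt vals
instance (vals : List (String × Int)) (out : List String) : Decidable (Spec_getBxyz vals out) := by unfold Spec_getBxyz; infer_instance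

-- ===== CLAIM (what is proved, stated in full; the proofs are below) =====
def Claim_equal_getBxyz : Prop := ∀ (vals : List (String × Int)), Dom_getBxyz vals → Spec_getBxyz vals (getBxyz vals)

-- ===== LEMMAS AND PROOFS =====

-- the grouping fold is three filters
theorem bucketStep_foldl (l : List String) (a b c : List String) :
    l.foldl bucketStep (a, b, c) =
      (a ++ l.filter (fun v => v.toList.take 1 = ['x']),
       b ++ l.filter (fun v => v.toList.take 1 = ['y']),
       c ++ l.filter (fun v => v.toList.take 1 = ['z'])) := by
  induction l generalizing a b c with
  | nil => simp
  | cons v t ih =>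
    simp only [List.foldl_cons, bucketStep]
    split_ifs with h1 h2 h3 <;> simp [*]

-- first-char bucketing is the startswith test of A
theorem take_one_eq_startswith (v : String) (ch : Char) :
    decide (v.toList.take 1 = [ch]) = PySem.Str.startswith v (String.ofList [ch]) := by
  rw [PySem.Str.startswith_eq]
  rcases hv : v.toList with _ | ⟨h, t⟩
  · simp [PySem.Chars.startswith]
  · simp only [PySem.Chars.startswith, List.isPrefixOf, String.toList_ofList,
      List.take_succ_cons, List.take_zero, Bool.and_true]
    by_cases h' : h = ch <;> simp [h', eq_comm, beq_eq_decide]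

-- reversing an ascending stable sort of a duplicate-free list is the descending sort
theorem rev_sorted_of_nodup (xs : List String) (hnd : xs.Nodup) :
    (PySem.List.sorted xs (fun x => x) false).reverse =
      PySem.List.sorted xs (fun x => x) true := by
  symm
  apply PySem.List.sorted_rev_eq_of_perm_of_pairwise_gt
  · exact (List.reverse_perm _).trans (PySem.List.sorted_perm xs _ _)
  · rw [List.pairwise_reverse]
    have hle := PySem.List.sorted_pairwise xs (fun x => x)
    have hnd' : (PySem.List.sorted xs (fun x => x) false).Nodup :=
      ((PySem.List.sorted_perm xs _ _).nodup_iff).mpr hnd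
    exact (hle.and hnd').imp (fun h => lt_of_le_of_ne h.1 h.2)

theorem getBxyz_eq (vals : List (String × Int)) : getBxyz vals = getBxyz_alt vals := by
  simp only [getBxyz, getBxyz_alt, bucketJoin]
  rw [bucketStep_foldl]
  have hnd : (PySem.Dict.ofList vals).keys.Nodup := PySem.Dict.nodup_keys_ofList vals
  have hf : ∀ ch : Char,
      (PySem.Dict.ofList vals).keys.filter (fun v => decide (v.toList.take 1 = [ch])) =
      (PySem.Dict.ofList vals).keys.filter (fun v => PySem.Str.startswith v (String.ofList [ch])) := by
    intro ch
    exact List.filter_congr (fun v _ => take_one_eq_startswith v ch)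
  simp only [List.foldl_cons, List.foldl_nil]
  rw [← hf 'x', ← hf 'y', ← hf 'z',
      rev_sorted_of_nodup _ (hnd.filter _),
      rev_sorted_of_nodup _ (hnd.filter _),
      rev_sorted_of_nodup _ (hnd.filter _)]
  simp

-- ===== VERDICT (by name: the statement is the Claim_ definition above) =====
theorem getBxyz_spec : Claim_equal_getBxyz := by
  intro vals _
  unfold Spec_getBxyz
  exact getBxyz_eq vals
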